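-- pv_equiv track=rewrite | github.com/hyojung-Park/mhp-algorithm-study | 김진효/week02/12910_나누어_떨어지는_숫자_배열.py | solution
-- ===== SOURCE A (Python) =====
-- def solution(arr, divisor):
--     answer = []
--
--     for n in arr:
--         if n % divisor == 0:
--             answer.append(n)
--
--     if len(answer) == 0:
--         answer.append(-1)
--     else:
--         answer.sort()
--
--     return answer
-- ===== SOURCE B (Python) =====
-- def solution(arr, divisor):
--     def insert(x, s):
--         # insert x into already-sorted list s, keeping it sorted
--         if not s or x <= s[0]:
--             return [x] + s
--         return [s[0]] + insert(x, s[1:])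
--
--     res = []
--     for n in arr:
--         if n % divisor == 0:
--             res = insert(n, res)
--     return res if res else [-1]
-- ===== Notes on version B (the rewrite author's own statement) =====
-- stated objective: alternative
-- what changed: B never calls a sort: it fuses filtering and ordering into one pass that keeps a sorted accumulator via ordered insertion (an online insertion sort), whereas A first collects all matches with an append loop and then sorts the collected list in place.
import Mathlib
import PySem

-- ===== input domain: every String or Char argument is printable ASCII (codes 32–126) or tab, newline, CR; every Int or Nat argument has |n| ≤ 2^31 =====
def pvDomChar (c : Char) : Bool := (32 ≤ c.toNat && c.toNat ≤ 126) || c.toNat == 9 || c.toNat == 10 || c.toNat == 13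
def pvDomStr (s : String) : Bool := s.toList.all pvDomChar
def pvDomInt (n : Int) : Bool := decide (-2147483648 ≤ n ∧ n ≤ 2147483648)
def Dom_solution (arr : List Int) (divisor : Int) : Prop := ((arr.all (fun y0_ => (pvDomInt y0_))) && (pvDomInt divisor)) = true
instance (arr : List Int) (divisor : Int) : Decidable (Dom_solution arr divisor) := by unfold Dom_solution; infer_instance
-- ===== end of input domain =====

-- B fuses filtering and ordering into one pass with a sorted-by-insertion accumulator (no sort call),
-- instead of A's append-loop filter followed by an in-place sort; equal return values proved on Pre_.

-- ===== PORT A =====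
def solution (arr : List Int) (divisor : Int) : List Int :=
  let answer := arr.foldl (fun acc n => if PySem.Int.mod n divisor = 0 then acc ++ [n] else acc) []
  if answer.length = 0 then [-1]
  else PySem.List.sorted answer (fun x => x) false

-- ===== PORT B =====
-- B's helper: insert x into an already-sorted list, keeping it sorted.
def bInsert (x : Int) (s : List Int) : List Int :=
  match s with
  | [] => [x]
  | y :: t => if x ≤ y then x :: y :: t else y :: bInsert x t

def solution_alt (arr : List Int) (divisor : Int) : List Int :=
  let res := arr.foldl (fun res n => if PySem.Int.mod n divisor = 0 then bInsert n res else res) []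
  if res = [] then [-1] else res

-- ===== PRECONDITION & SPEC =====
-- Pre_ excludes exactly the inputs where Python's 'n % divisor' raises ZeroDivisionError:
-- divisor = 0 with at least one element to test (both A and B raise there).
def Pre_solution (arr : List Int) (divisor : Int) : Prop := divisor ≠ 0 ∨ arr = []
instance (arr : List Int) (divisor : Int) : Decidable (Pre_solution arr divisor) := by unfold Pre_solution; infer_instance
def pvWitness_solution : List Int × Int := ([6, 4, 3, -8], 2)

def Spec_solution (arr : List Int) (divisor : Int) (out : List Int) : Prop := out = solution_alt arr divisor
instance (arr : List Int) (divisor : Int) (out : List Int) : Decidable (Spec_solution arr divisor out) := by unfold Spec_solution; infer_instance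

-- ===== CLAIM (what is proved, stated in full; the proofs are below) =====
def Claim_equal_solution : Prop := ∀ (arr : List Int) (divisor : Int), Dom_solution arr divisor → Pre_solution arr divisor → Spec_solution arr divisor (solution arr divisor)

-- ===== LEMMAS AND PROOFS =====

theorem bInsert_perm (x : Int) (s : List Int) : (bInsert x s).Perm (x :: s) := by
  induction s with
  | nil => simp [bInsert]
  | cons y t ih =>
    simp only [bInsert]
    split
    · exact List.Perm.refl _
    · exact (List.Perm.cons y ih).trans (List.Perm.swap x y t)

theorem bInsert_sorted (x : Int) (s : List Int) (hs : s.Pairwise (· ≤ ·)) :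
    (bInsert x s).Pairwise (· ≤ ·) := by
  induction s with
  | nil => simp [bInsert]
  | cons y t ih =>
    simp only [bInsert]
    rcases List.pairwise_cons.mp hs with ⟨hy, ht⟩
    split
    · rename_i hxy
      refine List.pairwise_cons.mpr ⟨?_, hs⟩
      intro z hz
      rcases List.mem_cons.mp hz with rfl | hz
      · exact hxy
      · exact le_trans hxy (hy z hz)
    · rename_i hxy
      refine List.pairwise_cons.mpr ⟨?_, ih ht⟩
      intro z hz
      have hz2 : z ∈ x :: t := (bInsert_perm x t).mem_iff.mp hz
      rcases List.mem_cons.mp hz2 with h1 | h2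
      · omega
      · exact hy z h2

-- B's fold produces a sorted permutation of acc ++ filter, given sorted acc.
theorem fold_insert_char (d : Int) (arr acc : List Int) (hacc : acc.Pairwise (· ≤ ·)) :
    (arr.foldl (fun res n => if PySem.Int.mod n d = 0 then bInsert n res else res) acc).Perm
      (acc ++ arr.filter (fun n => decide (PySem.Int.mod n d = 0))) ∧
    (arr.foldl (fun res n => if PySem.Int.mod n d = 0 then bInsert n res else res) acc).Pairwise (· ≤ ·) := by
  induction arr generalizing acc with
  | nil => exact ⟨by simp, hacc⟩
  | cons x xs ih =>
    simp only [List.foldl_cons, List.filter_cons]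
    by_cases h : PySem.Int.mod x d = 0
    · rw [if_pos h]
      simp only [h, decide_true, if_true]
      obtain ⟨hp, hs⟩ := ih (bInsert x acc) (bInsert_sorted x acc hacc)
      refine ⟨hp.trans ?_, hs⟩
      exact ((bInsert_perm x acc).append_right _).trans (List.perm_middle).symm
    · rw [if_neg h]
      simp only [h, decide_false, if_false]
      exact ih acc hacc

-- A's append-accumulator loop is a filter.
theorem foldl_filterA (d : Int) (arr acc : List Int) :
    arr.foldl (fun acc n => if PySem.Int.mod n d = 0 then acc ++ [n] else acc) acc
      = acc ++ arr.filter (fun n => decide (PySem.Int.mod n d = 0)) := by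
  induction arr generalizing acc with
  | nil => simp
  | cons x xs ih =>
    simp only [List.foldl_cons, List.filter_cons]
    by_cases h : PySem.Int.mod x d = 0 <;> simp [h, ih]

-- ===== VERDICT (by name: the statement is the Claim_ definition above) =====
theorem solution_spec : Claim_equal_solution := by
  intro arr divisor _ _
  unfold Spec_solution solution solution_alt
  simp only [foldl_filterA divisor arr [], List.nil_append]
  obtain ⟨hp, hs⟩ := fold_insert_char divisor arr [] (by simp)
  simp only [List.nil_append] at hp
  have hsorted := PySem.List.sorted_id_eq_of_perm_of_pairwise _ _ hp hs
  rw [← hsorted]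
  by_cases hf : arr.filter (fun n => decide (PySem.Int.mod n divisor = 0)) = []
  · simp [hf, PySem.List.sorted_eq_nil_iff]
  · simp [hf, PySem.List.sorted_eq_nil_iff, List.length_eq_zero_iff]
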